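-- pv_equiv track=rewrite | github.com/lowspeclabs/SmallCTL | src/smallctl/graph/tool_model_rules_support.py | _model_is_exact_small_gemma_4_it
-- ===== SOURCE A (Python) =====
-- _EXACT_GEMMA_4_SMALL_IT_MODEL_SUFFIXES = (
--     "gemma-4-e2b-it",
--     "gemma-4-e4b-it",
-- )
--
-- def _model_is_exact_small_gemma_4_it(model_name: str | None) -> bool:
--     normalized = str(model_name or "").strip().lower()
--     return bool(
--         normalized
--         and any(
--             normalized == suffix or normalized.endswith(f"/{suffix}")
--             for suffix in _EXACT_GEMMA_4_SMALL_IT_MODEL_SUFFIXES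
--         )
--     )
-- ===== SOURCE B (Python) =====
-- _SUFFIX_SET = frozenset((
--     "gemma-4-e2b-it",
--     "gemma-4-e4b-it",
-- ))
--
--
-- def _model_is_exact_small_gemma_4_it(model_name):
--     normalized = str(model_name or "").strip().lower()
--     return normalized.rsplit("/", 1)[-1] in _SUFFIX_SET
-- ===== Notes on version B (the rewrite author's own statement) =====
-- stated objective: idiomatic
-- what changed: Replaces the per-suffix loop of ==/endswith tests with a single parse (take the basename after the last slash) followed by one frozenset membership lookup; correct because no suffix contains a slash.
import Mathlib
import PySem

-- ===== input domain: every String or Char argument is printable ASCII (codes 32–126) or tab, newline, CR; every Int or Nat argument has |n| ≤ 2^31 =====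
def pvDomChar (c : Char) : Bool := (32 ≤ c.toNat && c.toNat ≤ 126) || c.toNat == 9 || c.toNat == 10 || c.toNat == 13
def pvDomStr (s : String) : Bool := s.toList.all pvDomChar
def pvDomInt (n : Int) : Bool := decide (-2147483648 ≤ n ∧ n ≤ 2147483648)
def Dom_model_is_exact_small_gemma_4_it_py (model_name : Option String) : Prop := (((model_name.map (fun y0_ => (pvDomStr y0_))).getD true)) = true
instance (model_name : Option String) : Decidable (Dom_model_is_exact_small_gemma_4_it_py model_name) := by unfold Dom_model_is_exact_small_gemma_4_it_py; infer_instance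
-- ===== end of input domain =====

-- B replaces A's per-suffix ==/endswith scan with one basename parse (text after the
-- last slash) followed by a single set lookup; objective: idiomatic.


-- ===== PORT A =====
def gemmaSuffixes : List String := ["gemma-4-e2b-it", "gemma-4-e4b-it"]

def model_is_exact_small_gemma_4_it_py (model_name : Option String) : Bool :=
  let normalized := PySem.Str.lower (PySem.Str.strip (model_name.getD ""))
  decide (normalized ≠ "") &&
    gemmaSuffixes.any (fun suffix =>
      normalized == suffix || PySem.Str.endswith normalized ("/" ++ suffix))

-- ===== PORT B =====
def gemmaSuffixSet : PySem.Set String := PySem.Set.ofList ["gemma-4-e2b-it", "gemma-4-e4b-it"]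

-- hand port of s.rsplit("/", 1)[-1] (exact: the component after the LAST '/';
-- the whole string when '/' is absent)
def notSlash (c : Char) : Bool := c ≠ '/'

def rsplitLast (s : String) : String :=
  String.ofList ((s.toList.reverse.takeWhile notSlash).reverse)

def model_is_exact_small_gemma_4_it_py_alt (model_name : Option String) : Bool :=
  let normalized := PySem.Str.lower (PySem.Str.strip (model_name.getD ""))
  gemmaSuffixSet.contains (rsplitLast normalized)

-- ===== PRECONDITION & SPEC =====
def Spec_model_is_exact_small_gemma_4_it_py (model_name : Option String) (out : Bool) : Prop := out = model_is_exact_small_gemma_4_it_py_alt model_name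
instance (model_name : Option String) (out : Bool) : Decidable (Spec_model_is_exact_small_gemma_4_it_py model_name out) := by unfold Spec_model_is_exact_small_gemma_4_it_py; infer_instance

-- ===== CLAIM (what is proved, stated in full; the proofs are below) =====
def Claim_equal_model_is_exact_small_gemma_4_it_py : Prop := ∀ (model_name : Option String), Dom_model_is_exact_small_gemma_4_it_py model_name → Spec_model_is_exact_small_gemma_4_it_py model_name (model_is_exact_small_gemma_4_it_py model_name)

-- ===== LEMMAS AND PROOFS =====

-- the basename on the List Char side
def tailCs (cs : List Char) : List Char := (cs.reverse.takeWhile notSlash).reverse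

theorem tailCs_decomp (cs : List Char) :
    ∃ r, cs = r ++ tailCs cs ∧ (r = [] ∨ ∃ q, r = q ++ ['/']) := by
  refine ⟨(cs.reverse.dropWhile notSlash).reverse, ?_, ?_⟩
  · have h := List.takeWhile_append_dropWhile (p := notSlash) (l := cs.reverse)
    simp only [tailCs]
    rw [← List.reverse_append, h, List.reverse_reverse]
  · rcases hd : cs.reverse.dropWhile notSlash with _ | ⟨a, t⟩
    · left; simp
    · right
      have ha : notSlash a = false := by
        have := List.head_dropWhile_not (p := notSlash) (l := cs.reverse) (by simp [hd])
        simpa [hd] using this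
      have ha' : a = '/' := by simpa [notSlash] using ha
      refine ⟨t.reverse, ?_⟩
      simp [ha']

theorem slash_not_mem_tailCs (cs : List Char) : '/' ∉ tailCs cs := by
  intro h
  have := List.mem_takeWhile_imp (by simpa [tailCs] using h)
  simp [notSlash] at this

theorem tailCs_suffix (cs : List Char) : tailCs cs <:+ cs := by
  obtain ⟨r, hr, -⟩ := tailCs_decomp cs
  exact ⟨r, hr.symm⟩

theorem suffix_of_suffix_of_le {cs s1 s2 : List Char} (h1 : s1 <:+ cs) (h2 : s2 <:+ cs)
    (hle : s1.length ≤ s2.length) : s1 <:+ s2 := by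
  rcases List.suffix_or_suffix_of_suffix h1 h2 with h | h
  · exact h
  · exact (List.IsSuffix.eq_of_length h (le_antisymm h.length_le hle)).symm ▸ List.suffix_rfl

theorem tailCs_key (cs X : List Char) (hX : X ≠ []) (hs : '/' ∉ X) :
    (cs = X ∨ ('/' :: X) <:+ cs) ↔ tailCs cs = X := by
  constructor
  · rintro (rfl | ⟨p, hp⟩)
    · -- no '/' in cs, so the basename is cs itself
      have hself : cs.reverse.takeWhile notSlash = cs.reverse := by
        rw [List.takeWhile_eq_self_iff]
        intro x hx
        simp only [notSlash, decide_eq_true_eq, ne_eq]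
        rintro rfl
        exact hs (by simpa using hx)
      simp [tailCs, hself]
    · -- cs = p ++ '/' :: X; tailCs cs and X are both suffixes, compare lengths
      have hXsuf : X <:+ cs := ⟨p ++ ['/'], by simpa using hp⟩
      have htsuf := tailCs_suffix cs
      by_contra hne
      rcases List.suffix_or_suffix_of_suffix hXsuf htsuf with h | h
      · -- X proper suffix of tailCs cs → '/'::X fits inside tailCs cs → '/' in it
        have hlt : X.length < (tailCs cs).length := by
          rcases lt_or_eq_of_le h.length_le with h' | h'
          · exact h'
          · exact absurd (List.IsSuffix.eq_of_length h h') (fun e => hne e.symm)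
        have hslX : ('/' :: X) <:+ cs := ⟨p, hp⟩
        have := suffix_of_suffix_of_le hslX htsuf (by simpa using hlt)
        exact slash_not_mem_tailCs cs (this.mem (by simp))
      · -- tailCs cs proper suffix of X → '/'::tailCs cs fits inside X → '/' ∈ X
        have hlt : (tailCs cs).length < X.length := by
          rcases lt_or_eq_of_le h.length_le with h' | h'
          · exact h'
          · exact absurd (List.IsSuffix.eq_of_length h h') hne
        obtain ⟨r, hr, hcase⟩ := tailCs_decomp cs
        rcases hcase with rfl | ⟨q, rfl⟩
        · -- tailCs cs = cs, but X <:+ cs with |X| > |cs|: impossible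
          have ht : tailCs cs = cs := by simpa using hr.symm
          have hlen := hXsuf.length_le
          rw [ht] at hlt
          omega
        · have hslt : ('/' :: tailCs cs) <:+ cs := ⟨q, by simpa using hr.symm⟩
          have := suffix_of_suffix_of_le hslt hXsuf (by simpa using hlt)
          exact hs (this.mem (by simp))
  · rintro rfl
    obtain ⟨r, hr, hcase⟩ := tailCs_decomp cs
    rcases hcase with rfl | ⟨q, rfl⟩
    · left; simpa using hr
    · right; exact ⟨q, by simpa using hr.symm⟩

theorem string_eq_iff_toList (s t : String) : s = t ↔ s.toList = t.toList :=
  ⟨fun h => by rw [h], fun h => String.ext (by simpa using h)⟩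

-- the core equivalence, for any normalized string
theorem check_eq (s : String) :
    (decide (s ≠ "") &&
      gemmaSuffixes.any (fun suffix =>
        s == suffix || PySem.Str.endswith s ("/" ++ suffix))) =
    gemmaSuffixSet.contains (rsplitLast s) := by
  have hX1 : ("gemma-4-e2b-it" : String).toList ≠ [] := by decide
  have hX2 : ("gemma-4-e4b-it" : String).toList ≠ [] := by decide
  have hs1 : '/' ∉ ("gemma-4-e2b-it" : String).toList := by decide
  have hs2 : '/' ∉ ("gemma-4-e4b-it" : String).toList := by decide
  have hk1 := tailCs_key s.toList _ hX1 hs1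
  have hk2 := tailCs_key s.toList _ hX2 hs2
  have hne : s ≠ "" ↔ s.toList ≠ [] := by
    rw [not_iff_not, string_eq_iff_toList]; simp
  have hrs : ∀ X : String, (rsplitLast s = X) ↔ tailCs s.toList = X.toList := by
    intro X
    rw [string_eq_iff_toList]
    simp [rsplitLast, tailCs]
  have hset : gemmaSuffixSet = ["gemma-4-e2b-it", "gemma-4-e4b-it"] := by decide
  rw [Bool.eq_iff_iff, hset]
  simp only [gemmaSuffixes, List.any_cons, List.any_nil, PySem.Set.contains,
    List.contains_cons, List.contains_nil, Bool.and_eq_true, Bool.or_eq_true, decide_eq_true_eq,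
    beq_iff_eq, Bool.or_false, PySem.Str.endswith_eq]
  rw [PySem.Chars.endswith_iff, PySem.Chars.endswith_iff]
  simp only [String.toList_append]
  rw [string_eq_iff_toList s, string_eq_iff_toList s, hrs, hrs]
  have e1 : ("/" : String).toList ++ ("gemma-4-e2b-it" : String).toList
      = '/' :: ("gemma-4-e2b-it" : String).toList := by decide
  have e2 : ("/" : String).toList ++ ("gemma-4-e4b-it" : String).toList
      = '/' :: ("gemma-4-e4b-it" : String).toList := by decide
  rw [e1, e2]
  constructor
  · rintro ⟨-, (h | h) | (h | h)⟩
    · exact Or.inl (hk1.mp (Or.inl h))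
    · exact Or.inl (hk1.mp (Or.inr h))
    · exact Or.inr (hk2.mp (Or.inl h))
    · exact Or.inr (hk2.mp (Or.inr h))
  · rintro (h | h)
    · have hd := hk1.mpr h
      refine ⟨hne.mpr ?_, Or.inl (by tauto)⟩
      rcases hd with h' | ⟨p, hp⟩
      · rw [h']; exact hX1
      · intro hnil; simp [hnil] at hp
    · have hd := hk2.mpr h
      refine ⟨hne.mpr ?_, Or.inr (by tauto)⟩
      rcases hd with h' | ⟨p, hp⟩
      · rw [h']; exact hX2
      · intro hnil; simp [hnil] at hp

-- ===== VERDICT (by name: the statement is the Claim_ definition above) =====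
theorem model_is_exact_small_gemma_4_it_py_spec : Claim_equal_model_is_exact_small_gemma_4_it_py := by
  intro model_name _
  unfold Spec_model_is_exact_small_gemma_4_it_py
  unfold model_is_exact_small_gemma_4_it_py model_is_exact_small_gemma_4_it_py_alt
  exact check_eq _
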